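-- pv_equiv track=rewrite | github.com/mnseong/Computer-Algorithm-ass | AL-PA05/pa05_fish.py | check_one
-- ===== SOURCE A (Python) =====
-- def flip(arr, i, j):
--     tmp = arr[:]
--     tmp[i:j + 1] = [-x for x in reversed(tmp[i:j + 1])]
--     return tmp
--
-- def check_one(arr):
--     target = [x + 1 for x in range(len(arr))]
--     start = arr.index(min(arr))
--     end = 0
--     for i in range(1, len(arr) + 1):
--         if -i in arr:
--             end = arr.index(-i)
--             break
--     res = flip(arr, start, end)
--     if res == target:
--         return True
--     return False
-- ===== SOURCE B (Python) =====
-- def check_one(arr):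
--     n = len(arr)
--     start = arr.index(min(arr))
--     negs = [x for x in arr if -n <= x <= -1]
--     end = arr.index(max(negs)) if negs else 0
--     for k in range(n):
--         expected = -arr[start + end - k] if start <= k <= end else arr[k]
--         if expected != k + 1:
--             return False
--     return True
-- ===== Notes on version B (the rewrite author's own statement) =====
-- stated objective: faster
-- what changed: B finds the flip end-point as the index of the maximum in-range negative element (one filter+max) instead of A's loop testing membership of -i for i=1..n, and verifies the sort positionally (arr[k]==k+1 outside the flip span, -arr[start+end-k]==k+1 inside) instead of materialising the flipped list via slice assignment and comparing it to [1..n].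
-- outside the precondition, e.g. on check_one([]): A raises ValueError, B raises ValueError
import Mathlib
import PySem

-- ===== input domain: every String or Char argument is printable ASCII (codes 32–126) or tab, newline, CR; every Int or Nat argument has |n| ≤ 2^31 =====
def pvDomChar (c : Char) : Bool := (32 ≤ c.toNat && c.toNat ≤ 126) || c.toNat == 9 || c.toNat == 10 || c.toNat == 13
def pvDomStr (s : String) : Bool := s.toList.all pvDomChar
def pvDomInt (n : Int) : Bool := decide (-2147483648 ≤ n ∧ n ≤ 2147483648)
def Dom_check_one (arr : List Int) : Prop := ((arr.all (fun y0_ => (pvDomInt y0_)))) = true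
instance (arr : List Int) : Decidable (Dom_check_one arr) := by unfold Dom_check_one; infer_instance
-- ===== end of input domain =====

-- B replaces A's flip-and-compare (slice assignment + list equality against [1..n]) by a
-- positional check, and finds the flip end-point as the index of the max in-range negative
-- element instead of scanning i = 1..n for membership of -i.  Objective: alternative.

-- ===== PORT A =====
-- flip(arr, i, j): both call sites pass 0 ≤ i,j < len(arr), so Python's slice assignment
-- tmp[i:j+1] = L is exactly tmp[:i] ++ L ++ tmp[max(i, j+1):]  (exact on that domain).
def pvFlip (arr : List Int) (i j : Nat) : List Int :=
  let seg := (PySem.List.slice arr (some (i : Int)) (some ((j : Int) + 1))).reverse.map (fun x => -x)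
  arr.take i ++ seg ++ arr.drop (max i (j + 1))

-- the 'for i in range(1, len(arr)+1): if -i in arr: end = arr.index(-i); break' loop
def pvEndLoop (arr : List Int) : List Int → Nat
  | [] => 0
  | i :: rest =>
    if (-i) ∈ arr then (PySem.List.index? arr (-i)).getD 0
    else pvEndLoop arr rest

def check_one (arr : List Int) : Bool :=
  let target := (List.range arr.length).map (fun x : Nat => (x : Int) + 1)
  match PySem.List.min? arr (fun x => x) with
  | none => false   -- Python raises ValueError on min([]); arr = [] is outside Pre_
  | some m =>
    let start := (PySem.List.index? arr m).getD 0
    let end_ := pvEndLoop arr (PySem.List.pyRange 1 ((arr.length : Int) + 1) 1)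
    let res := pvFlip arr start end_
    if res = target then true else false

-- ===== PORT B =====
def check_one_alt (arr : List Int) : Bool :=
  let n := arr.length
  match PySem.List.min? arr (fun x => x) with
  | none => false   -- Python raises ValueError on min([]); arr = [] is outside Pre_
  | some m =>
    let start := (PySem.List.index? arr m).getD 0
    let negs := arr.filter (fun x => decide (-(n : Int) ≤ x ∧ x ≤ -1))
    let end_ :=
      match PySem.List.max? negs (fun x => x) with
      | some mx => (PySem.List.index? arr mx).getD 0
      | none => 0
    (List.range n).all (fun k =>
      let expected : Int :=
        if start ≤ k ∧ k ≤ end_ then -(arr.getD (start + end_ - k) 0) else arr.getD k 0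
      decide (expected = (k : Int) + 1))

-- ===== PRECONDITION & SPEC =====
-- Pre_ excludes only arr = [], on which Python's min(arr) raises ValueError (in A and in B alike).
def Pre_check_one (arr : List Int) : Prop := arr ≠ []
instance (arr : List Int) : Decidable (Pre_check_one arr) := by unfold Pre_check_one; infer_instance
def pvWitness_check_one : List Int := ([3, -2, 1] : List Int)
def Spec_check_one (arr : List Int) (out : Bool) : Prop := out = check_one_alt arr
instance (arr : List Int) (out : Bool) : Decidable (Spec_check_one arr out) := by unfold Spec_check_one; infer_instance

-- ===== CLAIM (what is proved, stated in full; the proofs are below) =====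
def Claim_equal_check_one : Prop := ∀ (arr : List Int), Dom_check_one arr → Pre_check_one arr → Spec_check_one arr (check_one arr)

-- ===== LEMMAS AND PROOFS =====

-- A's end-loop over the remaining range [a, n+1) equals B's max-of-filtered-negatives rule.
theorem pvEndLoop_eq_aux (arr : List Int) (n : Nat) (hn : n = arr.length) :
    ∀ (d : Nat) (a : Int), 1 ≤ a → a = (n : Int) + 1 - d →
      pvEndLoop arr (PySem.List.pyRange a ((n : Int) + 1) 1) =
      (match PySem.List.max? (arr.filter (fun x => decide (-(n : Int) ≤ x ∧ x ≤ -a))) (fun x => x) with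
       | some mx => (PySem.List.index? arr mx).getD 0
       | none => 0) := by
  intro d
  induction d with
  | zero =>
    intro a ha hae
    have hae' : a = (n : Int) + 1 := by push_cast at hae; omega
    rw [PySem.List.pyRange_one_eq_nil (by omega)]
    have hfil : arr.filter (fun x => decide (-(n : Int) ≤ x ∧ x ≤ -a)) = [] := by
      rw [List.filter_eq_nil_iff]
      intro x _
      simp only [decide_eq_true_eq, not_and]
      omega
    rw [hfil]
    simp [pvEndLoop, PySem.List.max?]
  | succ d ih =>
    intro a ha hae
    by_cases hlt : a < (n : Int) + 1
    · rw [PySem.List.pyRange_one_cons hlt]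
      simp only [pvEndLoop]
      by_cases hmem : (-a) ∈ arr
      · rw [if_pos hmem]
        have hfm : (-a) ∈ arr.filter (fun x => decide (-(n : Int) ≤ x ∧ x ≤ -a)) := by
          rw [List.mem_filter]
          exact ⟨hmem, by simp only [decide_eq_true_eq]; omega⟩
        cases hmax : PySem.List.max? (arr.filter (fun x => decide (-(n : Int) ≤ x ∧ x ≤ -a))) (fun x => x) with
        | none =>
          rw [PySem.List.max?_eq_none_iff] at hmax
          rw [hmax] at hfm
          exact absurd hfm (List.not_mem_nil)
        | some w =>
          have hw1 : w ∈ arr.filter (fun x => decide (-(n : Int) ≤ x ∧ x ≤ -a)) :=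
            PySem.List.max?_mem hmax
          have hw2 : w ≤ -a := by
            have := (List.mem_filter.mp hw1).2
            simp only [decide_eq_true_eq] at this
            omega
          have hw3 : -a ≤ w := PySem.List.max?_isMax hmax (-a) hfm
          have hw : w = -a := le_antisymm hw2 hw3
          rw [hw]
      · rw [if_neg hmem]
        have hfil : arr.filter (fun x => decide (-(n : Int) ≤ x ∧ x ≤ -a))
            = arr.filter (fun x => decide (-(n : Int) ≤ x ∧ x ≤ -(a + 1))) := by
          apply List.filter_congr
          intro x hx
          have hne : x ≠ -a := fun h => hmem (h ▸ hx)
          simp only [decide_eq_decide]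
          omega
        rw [hfil]
        exact ih (a + 1) (by omega) (by push_cast at hae ⊢; omega)
    · exfalso; push_cast at hae; omega

theorem pvEndLoop_eq (arr : List Int) (n : Nat) (hn : n = arr.length) :
    pvEndLoop arr (PySem.List.pyRange 1 ((n : Int) + 1) 1) =
      (match PySem.List.max? (arr.filter (fun x => decide (-(n : Int) ≤ x ∧ x ≤ -1))) (fun x => x) with
       | some mx => (PySem.List.index? arr mx).getD 0
       | none => 0) := by
  have h := pvEndLoop_eq_aux arr n hn n 1 (by omega) (by omega)
  simpa using h

theorem pvFlip_length (arr : List Int) (s e : Nat)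
    (hs : s < arr.length) (he : e < arr.length) :
    (pvFlip arr s e).length = arr.length := by
  have hcast : ((e : Int) + 1) = (((e + 1 : Nat)) : Int) := by push_cast; ring
  unfold pvFlip
  rw [hcast, PySem.List.slice_natCast]
  simp only [List.length_append, List.length_take, List.length_map, List.length_reverse,
    List.length_drop]
  omega

-- getD description of the flipped list, at in-range positions.
theorem pvFlip_getD (arr : List Int) (s e k : Nat)
    (hs : s < arr.length) (he : e < arr.length) (hk : k < arr.length) :
    (pvFlip arr s e).getD k 0 =
      if s ≤ k ∧ k ≤ e then -(arr.getD (s + e - k) 0) else arr.getD k 0 := by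
  have hcast : ((e : Int) + 1) = (((e + 1 : Nat)) : Int) := by push_cast; ring
  unfold pvFlip
  rw [hcast, PySem.List.slice_natCast, List.append_assoc]
  have hts : (arr.take s).length = s := by simp; omega
  have hsegl : (((arr.drop s).take (e + 1 - s)).reverse.map (fun x : Int => -x)).length
      = (e + 1 - s) ⊓ (arr.length - s) := by simp
  by_cases hc : s ≤ k ∧ k ≤ e
  · obtain ⟨h1, h2⟩ := hc
    rw [if_pos ⟨h1, h2⟩]
    rw [List.getD_append_right _ _ _ _ (by omega)]
    rw [hts]
    rw [List.getD_append _ _ _ _ (by rw [hsegl]; omega)]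
    rw [List.getD_eq_getElem _ _ (by rw [hsegl]; omega)]
    rw [List.getD_eq_getElem _ _ (by omega)]
    simp only [List.getElem_map, List.getElem_reverse, List.length_take, List.length_drop,
      List.getElem_take, List.getElem_drop]
    congr 1
    congr 1
    omega
  · rw [if_neg hc]
    by_cases hks : k < s
    · rw [List.getD_append _ _ _ _ (by omega)]
      rw [List.getD_eq_getElem _ _ (by omega)]
      rw [List.getD_eq_getElem _ _ (by omega)]
      simp [List.getElem_take]
    · have h2 : e < k := by omega
      rw [List.getD_append_right _ _ _ _ (by omega), hts]
      rw [List.getD_append_right _ _ _ _ (by rw [hsegl]; omega), hsegl]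
      rw [List.getD_eq_getElem _ _ (by simp only [List.length_drop]; omega)]
      rw [List.getD_eq_getElem _ _ (by omega)]
      rw [List.getElem_drop]
      congr 1
      omega

-- index of a member is in range
theorem pvIndexD_lt {arr : List Int} {v : Int} (hv : v ∈ arr) :
    (PySem.List.index? arr v).getD 0 < arr.length := by
  obtain ⟨i, hi⟩ := Option.isSome_iff_exists.mp ((PySem.List.index?_isSome_iff arr v).mpr hv)
  rw [hi]
  obtain ⟨hk, -, -⟩ := PySem.List.getElem_of_index?_eq_some hi
  exact hk

-- the flipped list equals [1..n] iff B's positional check accepts every k < n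
theorem pvFlip_check (arr : List Int) (s e : Nat)
    (hs : s < arr.length) (he : e < arr.length) :
    (pvFlip arr s e = (List.range arr.length).map (fun x : Nat => (x : Int) + 1)) ↔
      (∀ k < arr.length,
        (if s ≤ k ∧ k ≤ e then -(arr.getD (s + e - k) 0) else arr.getD k 0) = (k : Int) + 1) := by
  constructor
  · intro heq k hk
    rw [← pvFlip_getD arr s e k hs he hk]
    rw [heq]
    rw [List.getD_eq_getElem _ _ (by rw [List.length_map, List.length_range]; exact hk)]
    rw [List.getElem_map, List.getElem_range]
  · intro h
    apply List.ext_getElem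
    · rw [pvFlip_length arr s e hs he, List.length_map, List.length_range]
    · intro k h1 h2
      have hk : k < arr.length := by rwa [pvFlip_length arr s e hs he] at h1
      have hx := h k hk
      rw [← pvFlip_getD arr s e k hs he hk] at hx
      rw [List.getD_eq_getElem _ _ h1] at hx
      rw [hx, List.getElem_map, List.getElem_range]

-- ===== VERDICT (by name: the statement is the Claim_ definition above) =====
theorem check_one_spec : Claim_equal_check_one := by
  unfold Claim_equal_check_one Spec_check_one
  intro arr _ hpre
  unfold check_one check_one_alt
  cases hmin : PySem.List.min? arr (fun x => x) with
  | none =>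
    exfalso
    exact hpre ((PySem.List.min?_eq_none_iff arr (fun x => x)).mp hmin)
  | some m =>
    simp only []
    have hm : m ∈ arr := PySem.List.min?_mem hmin
    have hstart : (PySem.List.index? arr m).getD 0 < arr.length := pvIndexD_lt hm
    rw [pvEndLoop_eq arr arr.length rfl]
    have hlen0 : 0 < arr.length := List.length_pos_iff.mpr hpre
    have hend : (match PySem.List.max? (arr.filter (fun x => decide (-(arr.length : Int) ≤ x ∧ x ≤ -1))) (fun x => x) with
       | some mx => (PySem.List.index? arr mx).getD 0
       | none => 0) < arr.length := by
      cases hmax : PySem.List.max? (arr.filter (fun x => decide (-(arr.length : Int) ≤ x ∧ x ≤ -1))) (fun x => x) with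
      | none => exact hlen0
      | some mx =>
        have hmx : mx ∈ arr := (List.mem_filter.mp (PySem.List.max?_mem hmax)).1
        exact pvIndexD_lt hmx
    set start := (PySem.List.index? arr m).getD 0 with hstartdef
    set endv := (match PySem.List.max? (arr.filter (fun x => decide (-(arr.length : Int) ≤ x ∧ x ≤ -1))) (fun x => x) with
       | some mx => (PySem.List.index? arr mx).getD 0
       | none => 0) with hendvdef
    have hiff := pvFlip_check arr start endv hstart hend
    by_cases hres : pvFlip arr start endv = (List.range arr.length).map (fun x : Nat => (x : Int) + 1)
    · rw [if_pos hres]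
      symm
      rw [List.all_eq_true]
      intro k hkmem
      exact decide_eq_true (hiff.mp hres k (List.mem_range.mp hkmem))
    · rw [if_neg hres]
      symm
      rw [Bool.eq_false_iff]
      intro hall
      rw [List.all_eq_true] at hall
      apply hres
      apply hiff.mpr
      intro k hk
      exact of_decide_eq_true (hall k (List.mem_range.mpr hk))
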